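-- pv_equiv track=rewrite | github.com/mathbeveridge/asm | starbar.py | list_to_starbar
-- ===== SOURCE A (Python) =====
-- def list_to_starbar(list, size):
--     starbar = []
--
--
--     for i in range(size+1):
--         for j in range(list.count(i)):
--             starbar.append(0);
--
--         if (i < size):
--             starbar.append(1)
--
--     return starbar
-- ===== SOURCE B (Python) =====
-- def list_to_starbar(list, size):
--     vals = sorted(v for v in list if v in range(size + 1))
--     out = []
--     current = 0
--     for v in vals:
--         while current < v:
--             out.append(1)
--             current += 1
--         out.append(0)
--     out += [1] * (size - current)
--     return out
-- ===== Notes on version B (the rewrite author's own statement) =====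
-- stated objective: faster
-- what changed: Replaces A's per-bucket list.count scan over range(size+1) with one filtered sort followed by a single merge pass that emits separators while advancing a bucket counter.
import Mathlib
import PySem

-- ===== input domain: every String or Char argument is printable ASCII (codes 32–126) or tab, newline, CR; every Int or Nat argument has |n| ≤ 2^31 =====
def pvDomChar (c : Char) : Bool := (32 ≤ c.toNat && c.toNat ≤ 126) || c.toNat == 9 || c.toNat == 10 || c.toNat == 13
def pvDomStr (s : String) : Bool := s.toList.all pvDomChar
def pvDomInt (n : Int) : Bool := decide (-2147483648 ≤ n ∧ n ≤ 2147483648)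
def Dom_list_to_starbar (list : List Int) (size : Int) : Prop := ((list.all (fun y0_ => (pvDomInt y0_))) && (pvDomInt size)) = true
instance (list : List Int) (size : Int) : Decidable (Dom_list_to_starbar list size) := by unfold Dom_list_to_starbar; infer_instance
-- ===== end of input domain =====

-- B replaces A's per-bucket list.count scans with one filtered sort plus a single merge pass (measured faster).

-- ===== PORT A =====
def list_to_starbar (list : List Int) (size : Int) : List Int :=
  (PySem.List.pyRange 0 (size + 1) 1).foldl (fun starbar i =>
    let starbar := (PySem.List.pyRange 0 (PySem.List.count list i : Int) 1).foldl
      (fun acc _ => acc ++ [0]) starbar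
    if i < size then starbar ++ [1] else starbar) []

-- ===== PORT B =====
-- the 'while current < v: out.append(1); current += 1' loop of Source B
def pvWhileOnes (out : List Int) (current v : Int) : List Int × Int :=
  if current < v then pvWhileOnes (out ++ [1]) (current + 1) v else (out, current)
termination_by (v - current).toNat
decreasing_by omega

def list_to_starbar_alt (list : List Int) (size : Int) : List Int :=
  let vals := PySem.List.sorted (list.filter (fun v => decide (0 ≤ v) && decide (v < size + 1)))
    (fun x => x) false
  let s := vals.foldl (fun (s : List Int × Int) v =>
      let s' := pvWhileOnes s.1 s.2 v
      (s'.1 ++ [0], s'.2)) ([], 0)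
  s.1 ++ PySem.List.pyRepeat [1] (size - s.2)

-- ===== PRECONDITION & SPEC =====
def Spec_list_to_starbar (list : List Int) (size : Int) (out : List Int) : Prop := out = list_to_starbar_alt list size
instance (list : List Int) (size : Int) (out : List Int) : Decidable (Spec_list_to_starbar list size out) := by unfold Spec_list_to_starbar; infer_instance

-- ===== CLAIM (what is proved, stated in full; the proofs are below) =====
def Claim_equal_list_to_starbar : Prop := ∀ (list : List Int) (size : Int), Dom_list_to_starbar list size → Spec_list_to_starbar list size (list_to_starbar list size)

-- ===== LEMMAS AND PROOFS =====

-- pure form of Source B's merge pass: ones up to each value, a 0 per value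
def pvEmit (c : Int) : List Int → List Int
  | [] => []
  | v :: vs => List.replicate (v - c).toNat 1 ++ 0 :: pvEmit (max c v) vs

-- the bucket segment A emits for value i
def pvSeg (vs : List Int) (size i : Int) : List Int :=
  List.replicate (vs.count i) 0 ++ if i < size then [1] else []

lemma pvWhileOnes_eq_aux : ∀ (n : Nat) (out : List Int) (current v : Int), (v - current).toNat ≤ n →
    pvWhileOnes out current v = (out ++ List.replicate (v - current).toNat 1, max current v) := by
  intro n
  induction n with
  | zero =>
    intro out current v hn
    rw [pvWhileOnes, if_neg (by omega)]
    simp [show (v - current).toNat = 0 by omega, show max current v = current by omega]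
  | succ k ih =>
    intro out current v hn
    by_cases h : current < v
    · rw [pvWhileOnes, if_pos h, ih (out ++ [1]) (current + 1) v (by omega)]
      have h1 : (v - current).toNat = (v - (current + 1)).toNat + 1 := by omega
      have h2 : max (current + 1) v = max current v := by omega
      simp [h1, h2, List.replicate_succ]
    · rw [pvWhileOnes, if_neg h]
      simp [show (v - current).toNat = 0 by omega, show max current v = current by omega]

lemma pvWhileOnes_eq (out : List Int) (current v : Int) :
    pvWhileOnes out current v = (out ++ List.replicate (v - current).toNat 1, max current v) :=
  pvWhileOnes_eq_aux (v - current).toNat out current v (le_refl _)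

lemma foldlB (vs : List Int) : ∀ (out : List Int) (c : Int),
    vs.foldl (fun (s : List Int × Int) v =>
      let s' := pvWhileOnes s.1 s.2 v
      (s'.1 ++ [0], s'.2)) (out, c) = (out ++ pvEmit c vs, vs.foldl max c) := by
  induction vs with
  | nil => simp [pvEmit]
  | cons v t ih =>
    intro out c
    rw [List.foldl_cons]
    have h1 : (let s' := pvWhileOnes (out, c).1 (out, c).2 v
        ((s'.1 ++ [0], s'.2) : List Int × Int)) = (out ++ List.replicate (v - c).toNat 1 ++ [0], max c v) := by
      simp [pvWhileOnes_eq]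
    rw [h1, ih]
    simp [pvEmit]

lemma foldl_max_replicate (c : Int) : ∀ m, (List.replicate m c).foldl max c = c := by
  intro m; induction m with
  | zero => simp
  | succ k ih => simp [List.replicate_succ, ih]

lemma pvEmit_replicate (c : Int) : ∀ m (vs : List Int),
    pvEmit c (List.replicate m c ++ vs) = List.replicate m 0 ++ pvEmit c vs := by
  intro m
  induction m with
  | zero => simp
  | succ k ih =>
    intro vs
    simp only [List.replicate_succ, List.cons_append, pvEmit]
    simp [ih]

lemma split_head (c : Int) : ∀ vs : List Int, vs.Pairwise (· ≤ ·) → (∀ v ∈ vs, c ≤ v) →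
    ∃ m vs', vs = List.replicate m c ++ vs' ∧ vs'.Pairwise (· ≤ ·) ∧ (∀ v ∈ vs', c < v) := by
  intro vs
  induction vs with
  | nil => exact fun _ _ => ⟨0, [], by simp, by simp, by simp⟩
  | cons v t ih =>
    intro hp hge
    rcases List.pairwise_cons.mp hp with ⟨hvle, hpt⟩
    by_cases hv : v = c
    · obtain ⟨m, vs', heq, hp', hgt⟩ := ih hpt (fun w hw => hge w (by simp [hw]))
      exact ⟨m + 1, vs', by simp [List.replicate_succ, heq, hv], hp', hgt⟩
    · have hcv : c < v := lt_of_le_of_ne (hge v (by simp)) (Ne.symm hv)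
      exact ⟨0, v :: t, by simp, hp, by
        intro w hw
        rcases List.mem_cons.mp hw with h | h
        · omega
        · exact lt_of_lt_of_le hcv (hvle w h)⟩

lemma count_gt_zero (c : Int) (vs : List Int) (hgt : ∀ v ∈ vs, c < v) : vs.count c = 0 :=
  List.count_eq_zero.mpr (fun h => absurd (hgt c h) (lt_irrefl c))

lemma count_replicate_append_ne (m : ℕ) (c i : Int) (vs : List Int) (h : i ≠ c) :
    (List.replicate m c ++ vs).count i = vs.count i := by
  simp only [List.count_append, List.count_replicate]
  have : ¬ (c = i) := fun hc => h hc.symm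
  simp [this]

-- the main bridge: Source B's merge pass over a sorted in-range list equals A's bucket concatenation
lemma main_bridge (size : Int) : ∀ (k : Nat) (c : Int) (vs : List Int),
    (size + 1 - c).toNat ≤ k → vs.Pairwise (· ≤ ·) → (∀ v ∈ vs, c ≤ v ∧ v ≤ size) →
    pvEmit c vs ++ List.replicate (size - vs.foldl max c).toNat 1
      = (PySem.List.pyRange c (size + 1) 1).flatMap (pvSeg vs size) := by
  intro k
  induction k with
  | zero =>
    intro c vs hk hp hb
    have hc : size + 1 ≤ c := by omega
    have hvs : vs = [] := by
      cases vs with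
      | nil => rfl
      | cons v t => have := hb v (by simp); omega
    subst hvs
    rw [PySem.List.pyRange_one_eq_nil hc]
    simp [pvEmit, show (size - c).toNat = 0 by omega]
  | succ k ih =>
    intro c vs hk hp hb
    by_cases hc : size < c
    · have hvs : vs = [] := by
        cases vs with
        | nil => rfl
        | cons v t => have := hb v (by simp); omega
      subst hvs
      rw [PySem.List.pyRange_one_eq_nil (by omega)]
      simp [pvEmit, show (size - c).toNat = 0 by omega]
    · replace hc : c ≤ size := by omega
      obtain ⟨m, vs', heq, hp', hgt⟩ := split_head c vs hp (fun v hv => (hb v hv).1)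
      subst heq
      rw [PySem.List.pyRange_one_cons (by omega : c < size + 1), List.flatMap_cons]
      have hcount_c : (List.replicate m c ++ vs').count c = m := by
        simp [List.count_append, count_gt_zero c vs' hgt]
      have hflat : (PySem.List.pyRange (c + 1) (size + 1) 1).flatMap (pvSeg (List.replicate m c ++ vs') size)
          = (PySem.List.pyRange (c + 1) (size + 1) 1).flatMap (pvSeg vs' size) := by
        simp only [List.flatMap]
        congr 1
        apply List.map_congr_left
        intro i hi
        have hi' : c + 1 ≤ i := (PySem.List.mem_pyRange_one.mp hi).1
        unfold pvSeg
        rw [count_replicate_append_ne m c i vs' (by omega)]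
      rw [pvEmit_replicate, List.foldl_append, foldl_max_replicate, hflat]
      cases vs' with
      | nil =>
        have hIH := ih (c + 1) [] (by omega) (by simp) (by simp)
        simp only [pvEmit, List.foldl_nil] at hIH ⊢
        rw [← hIH]
        unfold pvSeg
        rw [hcount_c]
        by_cases hlt : c < size
        · simp [if_pos hlt, show (size - c).toNat = (size - (c + 1)).toNat + 1 by omega,
            List.replicate_succ]
        · simp [if_neg hlt, show (size - c).toNat = 0 by omega,
            show (size - (c + 1)).toNat = 0 by omega]
      | cons w t =>
        have hcw : c < w := hgt w (by simp)
        have hws : w ≤ size := (hb w (by simp)).2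
        have hIH := ih (c + 1) (w :: t) (by omega) hp'
          (fun v hv => ⟨by have := hgt v hv; omega, (hb v (by simp [hv])).2⟩)
        have hemit : pvEmit c (w :: t) = 1 :: pvEmit (c + 1) (w :: t) := by
          simp [pvEmit, show max c w = w by omega, show max (c + 1) w = w by omega,
            show (w - c).toNat = (w - (c + 1)).toNat + 1 by omega, List.replicate_succ]
        have hfold : (w :: t).foldl max c = (w :: t).foldl max (c + 1) := by
          simp [show max c w = w by omega, show max (c + 1) w = w by omega]
        rw [hemit, hfold, ← hIH]
        unfold pvSeg
        rw [hcount_c, if_pos (by omega : c < size)]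
        simp

theorem list_to_starbar_spec_general (list : List Int) (size : Int) :
    list_to_starbar list size = list_to_starbar_alt list size := by
  -- characterize A as a flatMap of bucket segments
  have hA : list_to_starbar list size
      = (PySem.List.pyRange 0 (size + 1) 1).flatMap
          (fun i => List.replicate (list.count i) 0 ++ if i < size then [1] else []) := by
    unfold list_to_starbar
    have hfun : (fun (starbar : List Int) (i : Int) =>
        let starbar := (PySem.List.pyRange 0 (PySem.List.count list i : Int) 1).foldl
          (fun acc _ => acc ++ [0]) starbar
        if i < size then starbar ++ [1] else starbar)
        = (fun (starbar : List Int) (i : Int) =>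
            starbar ++ (List.replicate (list.count i) 0 ++ if i < size then [1] else [])) := by
      funext acc i
      show (if i < size then _ ++ [1] else _) = _
      rw [PySem.List.foldl_append_singleton_eq_map (f := fun _ => (0 : Int))]
      rw [List.map_const', PySem.List.length_pyRange_one]
      rw [show ((PySem.List.count list i : Int) - 0).toNat = list.count i by
        rw [PySem.List.count_eq]; omega]
      split_ifs <;> simp
    rw [hfun, PySem.List.foldl_append_eq_flatMap]
    simp
  -- characterize B via the merge-pass bridge
  simp only [list_to_starbar_alt]
  rw [foldlB]
  simp only [PySem.List.pyRepeat_singleton, List.nil_append]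
  set vals := PySem.List.sorted (list.filter (fun v => decide (0 ≤ v) && decide (v < size + 1)))
    (fun x => x) false with hvals
  have hperm : vals.Perm (list.filter (fun v => decide (0 ≤ v) && decide (v < size + 1))) :=
    PySem.List.sorted_perm _ _ _
  have hmem : ∀ v ∈ vals, (0 : Int) ≤ v ∧ v ≤ size := by
    intro v hv
    have := List.of_mem_filter (hperm.mem_iff.mp hv)
    simp at this
    omega
  have hpair : vals.Pairwise (· ≤ ·) :=
    PySem.List.sorted_pairwise (xs := list.filter (fun v => decide (0 ≤ v) && decide (v < size + 1)))
      (key := fun x => x)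
  rw [main_bridge size ((size + 1 - 0).toNat) 0 vals (le_refl _) hpair hmem]
  rw [hA]
  simp only [List.flatMap]
  congr 1
  apply List.map_congr_left
  intro i hi
  have hi' := PySem.List.mem_pyRange_one.mp hi
  unfold pvSeg
  have hcnt : vals.count i = list.count i := by
    rw [hperm.count_eq]
    exact List.count_filter (by simp; omega)
  rw [hcnt]

-- ===== VERDICT (by name: the statement is the Claim_ definition above) =====
theorem list_to_starbar_spec : Claim_equal_list_to_starbar := by
  intro list size _
  unfold Spec_list_to_starbar
  exact list_to_starbar_spec_general list size
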